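-- pv_equiv track=rewrite | github.com/ssantichaivekin/empress | empress/reconcile/recongraph_tools.py | count_mprs
-- ===== SOURCE A (Python) =====
-- def count_mprs(mapping_node: tuple, dtl_recon_graph: dict, memo: dict) -> int:
--     """
--     :param mapping_node: an individual mapping node that maps a node
--     for the parasite tree onto a node of the host tree, in the format
--     (p, h), where p is the parasite node and h is the host node
--     :param dtl_recon_graph: a DTLReconGraph, output from buildDTLReconGraph
--     (see that function for more info on the format of this input)
--     :param memo: a dictionary representing the running memo that is passed
--     down recursive calls of this function. At first it is just an empty
--     dictionary (see above function), but as it gets passed down calls, it collects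
--     keys of mapping nodes and values of MPR counts. This memo improves runtime
--     of the algorithm
--     :return: the number of MPRs spawned below the given mapping node in the graph
--     """
--
--     # Search the memo dictionary for previously calculated results
--     if mapping_node in memo:
--         return memo[mapping_node]
--
--     # Base case, occurs if being called on a child produced by a loss or contemporary evet
--     if mapping_node == (None, None):
--         return 1
--
--     # Initialize a variable to keep count of the number of MPRs
--     count = 0
--
--     # Loop over all event nodes corresponding to the current mapping node
--     for eventNode in dtl_recon_graph[mapping_node]:
--         # Save the children produced by the current event
--         mapping_child1 = eventNode[1]
--         mapping_child2 = eventNode[2]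
--
--         # Add the product of the counts of both children (over all children) for this event to get the parent's count
--         count += count_mprs(mapping_child1, dtl_recon_graph, memo) * count_mprs(mapping_child2, dtl_recon_graph, memo)
--
--     # Save the result in the memo
--     memo[mapping_node] = count
--
--     return count
-- ===== SOURCE B (Python) =====
-- def count_mprs(mapping_node, dtl_recon_graph, memo):
--     # Iterative fixpoint instead of recursion: repeat len(graph) elimination
--     # rounds, each resolving every node whose children are already resolved.
--     # Does not mutate memo (return-value equivalence with A only).
--     if mapping_node in memo:
--         return memo[mapping_node]
--     if mapping_node == (None, None):
--         return 1
--
--     counts = {}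
--
--     def val(c):
--         if c in memo:
--             return memo[c]
--         if c == (None, None):
--             return 1
--         return counts.get(c)
--
--     for _ in range(len(dtl_recon_graph)):
--         for node, events in dtl_recon_graph.items():
--             if node in counts or node in memo:
--                 continue
--             vals = [(val(e[1]), val(e[2])) for e in events]
--             if all(a is not None and b is not None for a, b in vals):
--                 counts[node] = sum(a * b for a, b in vals)
--     return counts[mapping_node]
-- ===== Notes on version B (the rewrite author's own statement) =====
-- stated objective: alternative
-- what changed: Replaces the memoized recursion by an iterative fixpoint: up to len(graph) elimination rounds, each round resolving every mapping node all of whose event children are already resolved, then one table lookup; no recursion, and memo is not mutated (return value is unchanged).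
import Mathlib
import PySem

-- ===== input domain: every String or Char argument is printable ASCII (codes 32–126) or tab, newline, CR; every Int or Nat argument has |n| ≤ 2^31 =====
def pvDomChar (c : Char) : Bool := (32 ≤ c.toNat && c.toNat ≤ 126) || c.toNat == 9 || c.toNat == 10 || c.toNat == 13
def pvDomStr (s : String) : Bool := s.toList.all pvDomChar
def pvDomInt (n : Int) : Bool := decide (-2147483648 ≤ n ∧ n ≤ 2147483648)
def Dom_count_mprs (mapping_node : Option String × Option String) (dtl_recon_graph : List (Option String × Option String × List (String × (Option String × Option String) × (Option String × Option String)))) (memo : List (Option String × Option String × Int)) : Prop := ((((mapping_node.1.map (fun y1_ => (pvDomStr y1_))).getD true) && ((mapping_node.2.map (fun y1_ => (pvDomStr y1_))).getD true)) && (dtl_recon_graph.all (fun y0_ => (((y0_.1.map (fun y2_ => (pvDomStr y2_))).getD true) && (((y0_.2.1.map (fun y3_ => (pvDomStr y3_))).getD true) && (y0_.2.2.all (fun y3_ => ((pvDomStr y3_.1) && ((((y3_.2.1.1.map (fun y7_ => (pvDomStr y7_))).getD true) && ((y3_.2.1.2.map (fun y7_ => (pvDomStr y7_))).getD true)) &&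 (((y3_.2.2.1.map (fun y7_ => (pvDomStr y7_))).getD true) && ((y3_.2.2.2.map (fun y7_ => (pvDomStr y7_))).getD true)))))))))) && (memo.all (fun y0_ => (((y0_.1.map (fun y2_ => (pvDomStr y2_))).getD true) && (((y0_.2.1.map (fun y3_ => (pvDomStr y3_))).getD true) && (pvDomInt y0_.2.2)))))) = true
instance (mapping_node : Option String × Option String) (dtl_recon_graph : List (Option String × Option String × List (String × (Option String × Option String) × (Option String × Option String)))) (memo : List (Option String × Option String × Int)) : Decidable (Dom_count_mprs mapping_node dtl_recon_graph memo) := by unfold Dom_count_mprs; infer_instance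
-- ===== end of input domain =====

-- B replaces A's memoized recursion by an iterative fixpoint of elimination rounds.
-- Equivalence is about the RETURN value only: A mutates `memo` in place, B does not.

abbrev PVNode := Option String × Option String
abbrev PVEv := String × PVNode × PVNode
abbrev PVEntry := Option String × Option String × List PVEv

-- key of a graph/memo entry (the Python dict key)
def pvKeyOf (e : PVEntry) : PVNode := (e.1, e.2.1)
def pvKeys (g : List PVEntry) : List PVNode := g.map pvKeyOf
def pvGraphDict (g : List PVEntry) : PySem.Dict PVNode (List PVEv) :=
  PySem.Dict.mk (g.map (fun e => ((e.1, e.2.1), e.2.2)))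
def pvMemoDict (memo : List (Option String × Option String × Int)) : PySem.Dict PVNode Int :=
  PySem.Dict.mk (memo.map (fun m => ((m.1, m.2.1), m.2.2)))

-- ===== PORT A =====
-- A's recursion, made structural with a fuel argument (fuel = graph size + 2 always suffices
-- under Pre_; fuel exhaustion / a missing graph key are Python exceptions, excluded by Pre_).
def cmA (g : PySem.Dict PVNode (List PVEv)) : Nat → PySem.Dict PVNode Int → PVNode → Int × PySem.Dict PVNode Int
  | 0, m, _ => (0, m)
  | fuel+1, m, mn =>
    match m.get? mn with
    | some v => (v, m)                         -- if mapping_node in memo: return memo[mapping_node]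
    | none =>
      if mn = (none, none) then (1, m)         -- base case
      else
        match g.get? mn with
        | none => (0, m)                       -- Python: KeyError (excluded by Pre_)
        | some evs =>
          let r := evs.foldl (fun (st : Int × PySem.Dict PVNode Int) ev =>
            let r1 := cmA g fuel st.2 ev.2.1
            let r2 := cmA g fuel r1.2 ev.2.2
            (st.1 + r1.1 * r2.1, r2.2)) (0, m)
          (r.1, r.2.insert mn r.1)             -- memo[mapping_node] = count; return count

def count_mprs (mapping_node : Option String × Option String) (dtl_recon_graph : List (Option String × Option String × List (String × (Option String × Option String) × (Option String × Option String)))) (memo : List (Option String × Option String × Int)) : Int :=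
  (cmA (pvGraphDict dtl_recon_graph) (dtl_recon_graph.length + 2) (pvMemoDict memo) mapping_node).1

-- ===== PORT B =====
-- val(c) of Source B
def pvVal (memoD counts : PySem.Dict PVNode Int) (c : PVNode) : Option Int :=
  match memoD.get? c with
  | some v => some v
  | none => if c = ((none, none) : PVNode) then some 1 else counts.get? c

-- one elimination round of Source B (the inner `for node, events in dtl_recon_graph.items()`)
def pvRound (memoD : PySem.Dict PVNode Int) (g : List PVEntry) (counts : PySem.Dict PVNode Int) : PySem.Dict PVNode Int :=
  g.foldl (fun counts e =>
    if (counts.get? (pvKeyOf e)).isSome || (memoD.get? (pvKeyOf e)).isSome then counts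
    else
      let vals := e.2.2.map (fun ev => (pvVal memoD counts ev.2.1, pvVal memoD counts ev.2.2))
      if vals.all (fun p => p.1.isSome && p.2.isSome) then
        counts.insert (pvKeyOf e) ((vals.map (fun p => p.1.getD 0 * p.2.getD 0)).sum)
      else counts) counts

-- the outer `for _ in range(len(dtl_recon_graph))` loop
def pvRounds (memoD : PySem.Dict PVNode Int) (g : List PVEntry) : Nat → PySem.Dict PVNode Int
  | 0 => PySem.Dict.empty
  | k+1 => pvRound memoD g (pvRounds memoD g k)

def count_mprs_alt (mapping_node : Option String × Option String) (dtl_recon_graph : List (Option String × Option String × List (String × (Option String × Option String) × (Option String × Option String)))) (memo : List (Option String × Option String × Int)) : Int :=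
  match (pvMemoDict memo).get? mapping_node with
  | some v => v                                 -- early memo hit
  | none =>
    if mapping_node = ((none, none) : PVNode) then 1   -- base case
    else ((pvRounds (pvMemoDict memo) dtl_recon_graph dtl_recon_graph.length).get? mapping_node).getD 0
                                                -- counts[mapping_node]; KeyError excluded by Pre_

-- ===== PRECONDITION & SPEC =====
-- a mapping node is already resolved w.r.t. the memo / the set R
def pvOk (memoD : PySem.Dict PVNode Int) (R : List PVNode) (c : PVNode) : Bool :=
  (memoD.get? c).isSome || c == ((none, none) : PVNode) || R.contains c

-- add to R every non-memoized graph key all of whose event children are resolved w.r.t. R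
def pvStep (memoD : PySem.Dict PVNode Int) (g : List PVEntry) (R : List PVNode) : List PVNode :=
  R ++ (g.filter (fun e => !R.contains (pvKeyOf e) && !(memoD.get? (pvKeyOf e)).isSome &&
        e.2.2.all (fun ev => pvOk memoD R ev.2.1 && pvOk memoD R ev.2.2))).map pvKeyOf

def pvIter (memoD : PySem.Dict PVNode Int) (g : List PVEntry) : Nat → List PVNode
  | 0 => []
  | k+1 => pvStep memoD g (pvIter memoD g k)

-- Pre_ excludes (a) duplicate-key association lists, which are not the image of any Python dict
-- (first-vs-last lookup is a pure representation corner), and (b) exactly the inputs on which A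
-- RAISES — KeyError (a needed mapping node missing from graph and memo) or RecursionError (a cycle
-- among the nodes reachable from mapping_node): the third disjunct is membership of mapping_node in
-- the least set of graph keys closed under "all event children resolved" (the standard Kahn-style
-- statement of "the subgraph below mapping_node is present and acyclic", i.e. exactly where A's
-- recursion terminates).  pvIter inspects only the input graph's key/child shape; it computes no
-- counts and copies neither port.
def Pre_count_mprs (mapping_node : Option String × Option String) (dtl_recon_graph : List (Option String × Option String × List (String × (Option String × Option String) × (Option String × Option String)))) (memo : List (Option String × Option String × Int)) : Prop :=
  (pvKeys dtl_recon_graph).Nodup ∧ (memo.map (fun m => (m.1, m.2.1))).Nodup ∧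
  (((pvMemoDict memo).get? mapping_node).isSome = true ∨
   mapping_node = ((none, none) : PVNode) ∨
   (pvIter (pvMemoDict memo) dtl_recon_graph dtl_recon_graph.length).contains mapping_node = true)
instance (mapping_node : Option String × Option String) (dtl_recon_graph : List (Option String × Option String × List (String × (Option String × Option String) × (Option String × Option String)))) (memo : List (Option String × Option String × Int)) : Decidable (Pre_count_mprs mapping_node dtl_recon_graph memo) := by unfold Pre_count_mprs; infer_instance

def pvWitness_count_mprs : (Option String × Option String) × (List (Option String × Option String × List (String × (Option String × Option String) × (Option String × Option String)))) × (List (Option String × Option String × Int)) :=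
  ((some "p", some "h"),
   [(some "p", some "h", [("S", (some "c", some "h"), ((none : Option String), (none : Option String)))]),
    (some "c", some "h", [("C", ((none : Option String), (none : Option String)), ((none : Option String), (none : Option String)))])],
   [(some "q", some "h", (3 : Int))])

def Spec_count_mprs (mapping_node : Option String × Option String) (dtl_recon_graph : List (Option String × Option String × List (String × (Option String × Option String) × (Option String × Option String)))) (memo : List (Option String × Option String × Int)) (out : Int) : Prop := out = count_mprs_alt mapping_node dtl_recon_graph memo
instance (mapping_node : Option String × Option String) (dtl_recon_graph : List (Option String × Option String × List (String × (Option String × Option String) × (Option String × Option String)))) (memo : List (Option String × Option String × Int)) (out : Int) : Decidable (Spec_count_mprs mapping_node dtl_recon_graph memo out) := by unfold Spec_count_mprs; infer_instance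

-- ===== CLAIM (what is proved, stated in full; the proofs are below) =====
def Claim_equal_count_mprs : Prop := ∀ (mapping_node : Option String × Option String) (dtl_recon_graph : List (Option String × Option String × List (String × (Option String × Option String) × (Option String × Option String)))) (memo : List (Option String × Option String × Int)), Dom_count_mprs mapping_node dtl_recon_graph memo → Pre_count_mprs mapping_node dtl_recon_graph memo → Spec_count_mprs mapping_node dtl_recon_graph memo (count_mprs mapping_node dtl_recon_graph memo)

-- ===== LEMMAS AND PROOFS =====

theorem pvWitness_ok : Dom_count_mprs pvWitness_count_mprs.1 pvWitness_count_mprs.2.1 pvWitness_count_mprs.2.2 ∧ Pre_count_mprs pvWitness_count_mprs.1 pvWitness_count_mprs.2.1 pvWitness_count_mprs.2.2 := by decide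

-- the reference semantics both ports are proved against: the count computable in d elimination steps
def pvN (memoD : PySem.Dict PVNode Int) (g : List PVEntry) : Nat → PVNode → Option Int
  | 0, _ => none
  | k+1, c =>
    match memoD.get? c with
    | some v => some v
    | none =>
      if c = ((none, none) : PVNode) then some 1
      else
        match (pvGraphDict g).get? c with
        | none => none
        | some evs =>
          if evs.all (fun ev => (pvN memoD g k ev.2.1).isSome && (pvN memoD g k ev.2.2).isSome)
          then some ((evs.map (fun ev => (pvN memoD g k ev.2.1).getD 0 * (pvN memoD g k ev.2.2).getD 0)).sum)
          else none

theorem pvN_zero (memoD : PySem.Dict PVNode Int) (g : List PVEntry) (c : PVNode) : pvN memoD g 0 c = none := rfl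

theorem pvN_succ (memoD : PySem.Dict PVNode Int) (g : List PVEntry) (k : Nat) (c : PVNode) :
    pvN memoD g (k+1) c =
      (match memoD.get? c with
       | some v => some v
       | none =>
         if c = ((none, none) : PVNode) then some 1
         else
           match (pvGraphDict g).get? c with
           | none => none
           | some evs =>
             if evs.all (fun ev => (pvN memoD g k ev.2.1).isSome && (pvN memoD g k ev.2.2).isSome)
             then some ((evs.map (fun ev => (pvN memoD g k ev.2.1).getD 0 * (pvN memoD g k ev.2.2).getD 0)).sum)
             else none) := rfl

-- branch-wise unfolding lemmas for pvN
theorem pvN_memo (memoD : PySem.Dict PVNode Int) (g : List PVEntry) (k : Nat) {c : PVNode} {w : Int}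
    (hm : memoD.get? c = some w) : pvN memoD g (k+1) c = some w := by
  rw [pvN_succ, hm]

theorem pvN_base (memoD : PySem.Dict PVNode Int) (g : List PVEntry) (k : Nat) {c : PVNode}
    (hm : memoD.get? c = none) (hb : c = ((none, none) : PVNode)) : pvN memoD g (k+1) c = some 1 := by
  rw [pvN_succ, hm]
  simp [hb]

theorem pvN_nokey (memoD : PySem.Dict PVNode Int) (g : List PVEntry) (k : Nat) {c : PVNode}
    (hm : memoD.get? c = none) (hb : ¬ c = ((none, none) : PVNode))
    (hg : (pvGraphDict g).get? c = none) : pvN memoD g (k+1) c = none := by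
  rw [pvN_succ, hm, hg]
  simp [hb]

theorem pvN_node (memoD : PySem.Dict PVNode Int) (g : List PVEntry) (k : Nat) {c : PVNode} {evs : List PVEv}
    (hm : memoD.get? c = none) (hb : ¬ c = ((none, none) : PVNode))
    (hg : (pvGraphDict g).get? c = some evs) :
    pvN memoD g (k+1) c =
      (if evs.all (fun ev => (pvN memoD g k ev.2.1).isSome && (pvN memoD g k ev.2.2).isSome)
       then some ((evs.map (fun ev => (pvN memoD g k ev.2.1).getD 0 * (pvN memoD g k ev.2.2).getD 0)).sum)
       else none) := by
  rw [pvN_succ, hm, hg]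
  simp [hb]

theorem pvN_mono (memoD : PySem.Dict PVNode Int) (g : List PVEntry) :
    ∀ (k : Nat) (c : PVNode) (v : Int), pvN memoD g k c = some v → pvN memoD g (k+1) c = some v := by
  intro k
  induction k with
  | zero => intro c v h; rw [pvN_zero] at h; cases h
  | succ k ih =>
    intro c v h
    cases hm : memoD.get? c with
    | some w =>
      rw [pvN_memo memoD g k hm] at h
      rw [pvN_memo memoD g (k+1) hm]
      exact h
    | none =>
      by_cases hb : c = ((none, none) : PVNode)
      · rw [pvN_base memoD g k hm hb] at h
        rw [pvN_base memoD g (k+1) hm hb]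
        exact h
      · cases hg : (pvGraphDict g).get? c with
        | none => rw [pvN_nokey memoD g k hm hb hg] at h; cases h
        | some evs =>
          rw [pvN_node memoD g k hm hb hg] at h
          rw [pvN_node memoD g (k+1) hm hb hg]
          by_cases hall : evs.all (fun ev => (pvN memoD g k ev.2.1).isSome && (pvN memoD g k ev.2.2).isSome) = true
          · rw [if_pos hall] at h
            have hch : ∀ ev ∈ evs, (pvN memoD g k ev.2.1).isSome = true ∧ (pvN memoD g k ev.2.2).isSome = true := by
              intro ev hev
              have := (List.all_eq_true.mp hall) ev hev
              exact ⟨(Bool.and_eq_true _ _ |>.mp this).1, (Bool.and_eq_true _ _ |>.mp this).2⟩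
            have hch' : ∀ ev ∈ evs, pvN memoD g (k+1) ev.2.1 = pvN memoD g k ev.2.1 ∧ pvN memoD g (k+1) ev.2.2 = pvN memoD g k ev.2.2 := by
              intro ev hev
              obtain ⟨h1, h2⟩ := hch ev hev
              obtain ⟨a, ha⟩ := Option.isSome_iff_exists.mp h1
              obtain ⟨b, hb2⟩ := Option.isSome_iff_exists.mp h2
              rw [ha, hb2]
              exact ⟨ih ev.2.1 a ha, ih ev.2.2 b hb2⟩
            have hall' : evs.all (fun ev => (pvN memoD g (k+1) ev.2.1).isSome && (pvN memoD g (k+1) ev.2.2).isSome) = true := by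
              apply List.all_eq_true.mpr
              intro ev hev
              obtain ⟨e1, e2⟩ := hch' ev hev
              rw [e1, e2]
              exact (List.all_eq_true.mp hall) ev hev
            rw [if_pos hall']
            have hmapeq : evs.map (fun ev => (pvN memoD g (k+1) ev.2.1).getD 0 * (pvN memoD g (k+1) ev.2.2).getD 0) =
                evs.map (fun ev => (pvN memoD g k ev.2.1).getD 0 * (pvN memoD g k ev.2.2).getD 0) := by
              apply List.map_congr_left
              intro ev hev
              obtain ⟨e1, e2⟩ := hch' ev hev
              rw [e1, e2]
            rw [hmapeq]
            exact h
          · rw [if_neg hall] at h; cases h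

theorem pvN_le (memoD : PySem.Dict PVNode Int) (g : List PVEntry) {j k : Nat} (hjk : j ≤ k) {c : PVNode} {v : Int}
    (h : pvN memoD g j c = some v) : pvN memoD g k c = some v := by
  induction k, hjk using Nat.le_induction with
  | base => exact h
  | succ k hk ih => exact pvN_mono memoD g k c v ih

theorem pvN_det (memoD : PySem.Dict PVNode Int) (g : List PVEntry) {j k : Nat} {c : PVNode} {w v : Int}
    (hw : pvN memoD g j c = some w) (hv : pvN memoD g k c = some v) : w = v := by
  rcases le_total j k with h | h
  · have := pvN_le memoD g h hw
    rw [this] at hv; exact Option.some_inj.mp hv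
  · have := pvN_le memoD g h hv
    rw [this] at hw; exact (Option.some_inj.mp hw).symm

-- dict lookup of a graph entry's key returns its event list (Nodup keys)
theorem graph_get (g : List PVEntry) (e : PVEntry)
    (hnd : (pvKeys g).Nodup) (he : e ∈ g) :
    (pvGraphDict g).get? (pvKeyOf e) = some e.2.2 := by
  have hkeys : (pvGraphDict g).keys = pvKeys g := by
    simp [pvGraphDict, PySem.Dict.keys, pvKeys, pvKeyOf, List.map_map, Function.comp]
  apply PySem.Dict.get?_of_mem_items
  · show ((pvKeyOf e), e.2.2) ∈ g.map (fun e => ((e.1, e.2.1), e.2.2))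
    exact List.mem_map.mpr ⟨e, he, rfl⟩
  · rw [hkeys]; exact hnd

-- the invariant A's running memo maintains
def pvInvM (memoD : PySem.Dict PVNode Int) (g : List PVEntry) (m : PySem.Dict PVNode Int) : Prop :=
  (∀ c v, memoD.get? c = some v → m.get? c = some v) ∧
  (∀ c v, m.get? c = some v → ∃ k, pvN memoD g k c = some v)

theorem cmA_ok (memoD : PySem.Dict PVNode Int) (g : List PVEntry) :
    ∀ (fuel d : Nat) (m : PySem.Dict PVNode Int) (n : PVNode) (v : Int), d < fuel → pvInvM memoD g m →
      pvN memoD g d n = some v →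
      (cmA (pvGraphDict g) fuel m n).1 = v ∧
      (∀ c w, m.get? c = some w → (cmA (pvGraphDict g) fuel m n).2.get? c = some w) ∧
      pvInvM memoD g (cmA (pvGraphDict g) fuel m n).2 := by
  intro fuel
  induction fuel with
  | zero => intro d m n v hd; omega
  | succ F ih =>
    intro d m n v hd hInv hN
    cases hm : m.get? n with
    | some w =>
      have hcm : cmA (pvGraphDict g) (F+1) m n = (w, m) := by simp [cmA, hm]
      rw [hcm]
      obtain ⟨k, hk⟩ := hInv.2 n w hm
      exact ⟨pvN_det memoD g hk hN, fun c w' h => h, hInv⟩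
    | none =>
      have hMD : memoD.get? n = none := by
        cases hM : memoD.get? n with
        | none => rfl
        | some w => rw [hInv.1 n w hM] at hm; cases hm
      cases d with
      | zero => rw [pvN_zero] at hN; cases hN
      | succ e =>
        by_cases hb : n = ((none, none) : PVNode)
        · rw [pvN_base memoD g e hMD hb] at hN
          subst hb
          have hcm : cmA (pvGraphDict g) (F+1) m ((none, none) : PVNode) = (1, m) := by
            simp [cmA, hm]
          rw [hcm]
          exact ⟨Option.some_inj.mp hN, fun c w h => h, hInv⟩
        · cases hg : (pvGraphDict g).get? n with
          | none => rw [pvN_nokey memoD g e hMD hb hg] at hN; cases hN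
          | some evs =>
            rw [pvN_node memoD g e hMD hb hg] at hN
            by_cases hall : evs.all (fun ev => (pvN memoD g e ev.2.1).isSome && (pvN memoD g e ev.2.2).isSome) = true
            swap
            · rw [if_neg hall] at hN; cases hN
            rw [if_pos hall] at hN
            have he : e < F := by omega
            have hch : ∀ ev ∈ evs, (pvN memoD g e ev.2.1).isSome = true ∧ (pvN memoD g e ev.2.2).isSome = true := by
              intro ev hev
              have := (List.all_eq_true.mp hall) ev hev
              exact ⟨(Bool.and_eq_true _ _ |>.mp this).1, (Bool.and_eq_true _ _ |>.mp this).2⟩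
            have hfold : ∀ (l : List PVEv),
                (∀ ev ∈ l, (pvN memoD g e ev.2.1).isSome = true ∧ (pvN memoD g e ev.2.2).isSome = true) →
                ∀ (acc : Int) (m0 : PySem.Dict PVNode Int), pvInvM memoD g m0 →
                (l.foldl (fun (st : Int × PySem.Dict PVNode Int) ev =>
                    let r1 := cmA (pvGraphDict g) F st.2 ev.2.1
                    let r2 := cmA (pvGraphDict g) F r1.2 ev.2.2
                    (st.1 + r1.1 * r2.1, r2.2)) (acc, m0)).1 =
                  acc + (l.map (fun ev => (pvN memoD g e ev.2.1).getD 0 * (pvN memoD g e ev.2.2).getD 0)).sum ∧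
                (∀ c w, m0.get? c = some w →
                  ((l.foldl (fun (st : Int × PySem.Dict PVNode Int) ev =>
                    let r1 := cmA (pvGraphDict g) F st.2 ev.2.1
                    let r2 := cmA (pvGraphDict g) F r1.2 ev.2.2
                    (st.1 + r1.1 * r2.1, r2.2)) (acc, m0)).2).get? c = some w) ∧
                pvInvM memoD g (l.foldl (fun (st : Int × PySem.Dict PVNode Int) ev =>
                    let r1 := cmA (pvGraphDict g) F st.2 ev.2.1
                    let r2 := cmA (pvGraphDict g) F r1.2 ev.2.2
                    (st.1 + r1.1 * r2.1, r2.2)) (acc, m0)).2 := by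
              intro l
              induction l with
              | nil => intro _ acc m0 h0; exact ⟨by simp, fun c w h => h, h0⟩
              | cons ev l ihl =>
                intro hok acc m0 h0
                obtain ⟨hs1, hs2⟩ := hok ev List.mem_cons_self
                obtain ⟨a, ha⟩ := Option.isSome_iff_exists.mp hs1
                obtain ⟨b, hb2⟩ := Option.isSome_iff_exists.mp hs2
                obtain ⟨h1v, h1p, h1i⟩ := ih e m0 ev.2.1 a he h0 ha
                obtain ⟨h2v, h2p, h2i⟩ := ih e (cmA (pvGraphDict g) F m0 ev.2.1).2 ev.2.2 b he h1i hb2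
                obtain ⟨hfv, hfp, hfi⟩ := ihl (fun x hx => hok x (List.mem_cons_of_mem _ hx))
                  (acc + (cmA (pvGraphDict g) F m0 ev.2.1).1 * (cmA (pvGraphDict g) F (cmA (pvGraphDict g) F m0 ev.2.1).2 ev.2.2).1)
                  (cmA (pvGraphDict g) F (cmA (pvGraphDict g) F m0 ev.2.1).2 ev.2.2).2 h2i
                refine ⟨?_, ?_, hfi⟩
                · rw [List.foldl_cons]
                  simp only at hfv ⊢
                  rw [hfv, h1v, h2v, List.map_cons, List.sum_cons, ha, hb2]
                  simp only [Option.getD_some]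
                  ring
                · intro c w h
                  rw [List.foldl_cons]
                  exact hfp c w (h2p c w (h1p c w h))
            obtain ⟨hfv, hfp, hfi⟩ := hfold evs hch 0 m hInv
            have hcm : cmA (pvGraphDict g) (F+1) m n =
                ((evs.foldl (fun (st : Int × PySem.Dict PVNode Int) ev =>
                    let r1 := cmA (pvGraphDict g) F st.2 ev.2.1
                    let r2 := cmA (pvGraphDict g) F r1.2 ev.2.2
                    (st.1 + r1.1 * r2.1, r2.2)) (0, m)).1,
                 ((evs.foldl (fun (st : Int × PySem.Dict PVNode Int) ev =>
                    let r1 := cmA (pvGraphDict g) F st.2 ev.2.1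
                    let r2 := cmA (pvGraphDict g) F r1.2 ev.2.2
                    (st.1 + r1.1 * r2.1, r2.2)) (0, m)).2).insert n
                   (evs.foldl (fun (st : Int × PySem.Dict PVNode Int) ev =>
                    let r1 := cmA (pvGraphDict g) F st.2 ev.2.1
                    let r2 := cmA (pvGraphDict g) F r1.2 ev.2.2
                    (st.1 + r1.1 * r2.1, r2.2)) (0, m)).1) := by
              simp only [cmA, hm, hg, if_neg hb]
            have hvv : (evs.foldl (fun (st : Int × PySem.Dict PVNode Int) ev =>
                    let r1 := cmA (pvGraphDict g) F st.2 ev.2.1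
                    let r2 := cmA (pvGraphDict g) F r1.2 ev.2.2
                    (st.1 + r1.1 * r2.1, r2.2)) (0, m)).1 = v := by
              rw [hfv]
              rw [← Option.some_inj.mp hN]
              ring
            have hNn : pvN memoD g (e+1) n = some v := by
              rw [pvN_node memoD g e hMD hb hg, if_pos hall]
              exact hN
            rw [hcm]
            refine ⟨hvv, ?_, ?_, ?_⟩
            · intro c w h
              have hcn : c ≠ n := by intro hcn; rw [hcn, hm] at h; cases h
              rw [PySem.Dict.get?_insert, if_neg hcn]
              exact hfp c w h
            · intro c w h
              have hcn : c ≠ n := by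
                intro hcn; rw [hcn, hMD] at h; cases h
              rw [PySem.Dict.get?_insert, if_neg hcn]
              exact hfi.1 c w h
            · intro c w h
              rw [PySem.Dict.get?_insert] at h
              by_cases hcn : c = n
              · rw [if_pos hcn] at h
                rw [hvv] at h
                exact ⟨e+1, by rw [hcn, hNn, h]⟩
              · rw [if_neg hcn] at h
                exact hfi.2 c w h

-- the invariant B's counts table maintains (entries at the (None,None) key are never read)
def pvInvC (memoD : PySem.Dict PVNode Int) (g : List PVEntry) (counts : PySem.Dict PVNode Int) : Prop :=
  ∀ c v, c ≠ ((none, none) : PVNode) → counts.get? c = some v → ∃ k, pvN memoD g k c = some v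

theorem pvVal_sound (memoD : PySem.Dict PVNode Int) (g : List PVEntry) (counts : PySem.Dict PVNode Int)
    (hInv : pvInvC memoD g counts) (c : PVNode) (v : Int) (h : pvVal memoD counts c = some v) :
    ∃ k, pvN memoD g k c = some v := by
  unfold pvVal at h
  cases hm : memoD.get? c with
  | some w =>
    rw [hm] at h
    have h' : some w = some v := h
    exact ⟨1, by rw [pvN_memo memoD g 0 hm]; exact h'⟩
  | none =>
    rw [hm] at h
    have h' : (if c = ((none, none) : PVNode) then some 1 else counts.get? c) = some v := h
    by_cases hb : c = ((none, none) : PVNode)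
    · rw [if_pos hb] at h'
      exact ⟨1, by rw [pvN_base memoD g 0 hm hb]; exact h'⟩
    · rw [if_neg hb] at h'
      exact hInv c v hb h'

theorem exists_uniform (memoD : PySem.Dict PVNode Int) (g : List PVEntry) (q : PVNode → Option Int) :
    ∀ (l : List PVEv),
      (∀ ev ∈ l, (∃ a, q ev.2.1 = some a ∧ ∃ k, pvN memoD g k ev.2.1 = some a) ∧
                 (∃ b, q ev.2.2 = some b ∧ ∃ k, pvN memoD g k ev.2.2 = some b)) →
      ∃ K, ∀ ev ∈ l, pvN memoD g K ev.2.1 = q ev.2.1 ∧ pvN memoD g K ev.2.2 = q ev.2.2 := by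
  intro l
  induction l with
  | nil => intro _; exact ⟨0, by simp⟩
  | cons ev l ihl =>
    intro h
    obtain ⟨⟨a, hqa, k1, hk1⟩, ⟨b, hqb, k2, hk2⟩⟩ := h ev List.mem_cons_self
    obtain ⟨K, hK⟩ := ihl (fun x hx => h x (List.mem_cons_of_mem _ hx))
    refine ⟨max (max k1 k2) K, ?_⟩
    intro x hx
    rcases List.mem_cons.mp hx with hx1 | hx2
    · subst hx1
      constructor
      · rw [hqa]; exact pvN_le memoD g (le_max_of_le_left (le_max_left _ _)) hk1
      · rw [hqb]; exact pvN_le memoD g (le_max_of_le_left (le_max_right _ _)) hk2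
    · obtain ⟨e1, e2⟩ := hK x hx2
      obtain ⟨⟨a', hqa', _⟩, ⟨b', hqb', _⟩⟩ := h x (List.mem_cons_of_mem _ hx2)
      constructor
      · rw [hqa']; rw [hqa'] at e1; exact pvN_le memoD g (le_max_right _ _) e1
      · rw [hqb']; rw [hqb'] at e2; exact pvN_le memoD g (le_max_right _ _) e2

theorem round_sound (memoD : PySem.Dict PVNode Int) (g : List PVEntry) (hnd : (pvKeys g).Nodup) :
    ∀ (l : List PVEntry), (∀ e ∈ l, e ∈ g) → ∀ (counts : PySem.Dict PVNode Int), pvInvC memoD g counts →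
      pvInvC memoD g (l.foldl (fun counts e =>
        if (counts.get? (pvKeyOf e)).isSome || (memoD.get? (pvKeyOf e)).isSome then counts
        else
          let vals := e.2.2.map (fun ev => (pvVal memoD counts ev.2.1, pvVal memoD counts ev.2.2))
          if vals.all (fun p => p.1.isSome && p.2.isSome) then
            counts.insert (pvKeyOf e) ((vals.map (fun p => p.1.getD 0 * p.2.getD 0)).sum)
          else counts) counts) := by
  intro l
  induction l with
  | nil => intro _ counts h; exact h
  | cons e l ihl =>
    intro hsub counts hInv
    rw [List.foldl_cons]
    apply ihl (fun x hx => hsub x (List.mem_cons_of_mem _ hx))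
    by_cases hskip : ((counts.get? (pvKeyOf e)).isSome || (memoD.get? (pvKeyOf e)).isSome) = true
    · rw [if_pos hskip]; exact hInv
    · rw [if_neg hskip]
      simp only [Bool.or_eq_true, not_or, Bool.not_eq_true] at hskip
      obtain ⟨hcn, hmn⟩ := hskip
      by_cases hall : (e.2.2.map (fun ev => (pvVal memoD counts ev.2.1, pvVal memoD counts ev.2.2))).all
          (fun p => p.1.isSome && p.2.isSome) = true
      swap
      · simp only [if_neg hall]; exact hInv
      simp only [if_pos hall]
      intro c v hcb hget
      rw [PySem.Dict.get?_insert] at hget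
      by_cases hc : c = pvKeyOf e
      swap
      · rw [if_neg hc] at hget; exact hInv c v hcb hget
      rw [if_pos hc] at hget
      -- c is the freshly inserted key; its value is the sum over the events
      have hchild : ∀ ev ∈ e.2.2, (pvVal memoD counts ev.2.1).isSome = true ∧ (pvVal memoD counts ev.2.2).isSome = true := by
        intro ev hev
        have := (List.all_eq_true.mp hall) (pvVal memoD counts ev.2.1, pvVal memoD counts ev.2.2)
          (List.mem_map.mpr ⟨ev, hev, rfl⟩)
        exact ⟨(Bool.and_eq_true _ _ |>.mp this).1, (Bool.and_eq_true _ _ |>.mp this).2⟩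
      obtain ⟨K, hK⟩ := exists_uniform memoD g (pvVal memoD counts) e.2.2 (by
        intro ev hev
        obtain ⟨h1, h2⟩ := hchild ev hev
        obtain ⟨a, ha⟩ := Option.isSome_iff_exists.mp h1
        obtain ⟨b, hb2⟩ := Option.isSome_iff_exists.mp h2
        exact ⟨⟨a, ha, pvVal_sound memoD g counts hInv ev.2.1 a ha⟩,
               ⟨b, hb2, pvVal_sound memoD g counts hInv ev.2.2 b hb2⟩⟩)
      refine ⟨K + 1, ?_⟩
      have hmemoc : memoD.get? c = none := by rw [hc]; exact Option.not_isSome_iff_eq_none.mp (by rw [hmn]; simp)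
      have hgc : (pvGraphDict g).get? c = some e.2.2 := by
        rw [hc]; exact graph_get g e hnd (hsub e List.mem_cons_self)
      rw [pvN_node memoD g K hmemoc hcb hgc]
      have hallN : e.2.2.all (fun ev => (pvN memoD g K ev.2.1).isSome && (pvN memoD g K ev.2.2).isSome) = true := by
        apply List.all_eq_true.mpr
        intro ev hev
        obtain ⟨e1, e2⟩ := hK ev hev
        obtain ⟨h1, h2⟩ := hchild ev hev
        rw [e1, e2]
        exact Bool.and_eq_true _ _ |>.mpr ⟨h1, h2⟩
      rw [if_pos hallN, ← hget, List.map_map]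
      refine congrArg (fun l : List Int => some l.sum) ?_
      apply List.map_congr_left
      intro ev hev
      obtain ⟨e1, e2⟩ := hK ev hev
      simp only [Function.comp_apply]
      rw [e1, e2]

theorem rounds_sound (memoD : PySem.Dict PVNode Int) (g : List PVEntry) (hnd : (pvKeys g).Nodup) :
    ∀ j, pvInvC memoD g (pvRounds memoD g j) := by
  intro j
  induction j with
  | zero =>
    intro c v _ h
    rw [show pvRounds memoD g 0 = PySem.Dict.empty from rfl, PySem.Dict.get?_empty] at h
    cases h
  | succ j ihj =>
    show pvInvC memoD g (pvRound memoD g (pvRounds memoD g j))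
    unfold pvRound
    exact round_sound memoD g hnd g (fun e he => he) (pvRounds memoD g j) ihj

-- isSome entries survive any prefix of a round
theorem foldl_isSome (memoD : PySem.Dict PVNode Int) :
    ∀ (l : List PVEntry) (counts : PySem.Dict PVNode Int) (c : PVNode),
      ((counts.get? c).isSome = true) →
      (((l.foldl (fun counts e =>
        if (counts.get? (pvKeyOf e)).isSome || (memoD.get? (pvKeyOf e)).isSome then counts
        else
          let vals := e.2.2.map (fun ev => (pvVal memoD counts ev.2.1, pvVal memoD counts ev.2.2))
          if vals.all (fun p => p.1.isSome && p.2.isSome) then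
            counts.insert (pvKeyOf e) ((vals.map (fun p => p.1.getD 0 * p.2.getD 0)).sum)
          else counts) counts).get? c).isSome = true) := by
  intro l
  induction l with
  | nil => intro counts c h; exact h
  | cons e l ihl =>
    intro counts c h
    rw [List.foldl_cons]
    apply ihl
    by_cases hskip : ((counts.get? (pvKeyOf e)).isSome || (memoD.get? (pvKeyOf e)).isSome) = true
    · rw [if_pos hskip]; exact h
    · rw [if_neg hskip]
      by_cases hall : (e.2.2.map (fun ev => (pvVal memoD counts ev.2.1, pvVal memoD counts ev.2.2))).all
          (fun p => p.1.isSome && p.2.isSome) = true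
      · simp only [if_pos hall]
        rw [PySem.Dict.get?_insert]
        by_cases hc : c = pvKeyOf e
        · rw [if_pos hc]; simp
        · rw [if_neg hc]; exact h
      · simp only [if_neg hall]; exact h

theorem round_complete (memoD : PySem.Dict PVNode Int) (g : List PVEntry) (R : List PVNode)
    (counts : PySem.Dict PVNode Int) (hR : ∀ x ∈ R, ((counts.get? x).isSome = true)) :
    ∀ n ∈ pvStep memoD g R, (((pvRound memoD g counts).get? n).isSome = true) := by
  intro n hn
  rcases List.mem_append.mp hn with hn1 | hn1
  · exact foldl_isSome memoD g counts n (hR n hn1)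
  · obtain ⟨e, hef, hkey⟩ := List.mem_map.mp hn1
    obtain ⟨heg, hflt⟩ := List.mem_filter.mp hef
    simp only [Bool.and_eq_true, Bool.not_eq_true'] at hflt
    obtain ⟨⟨hnotR, hnotM⟩, hchildren⟩ := hflt
    obtain ⟨p, s, hps⟩ := List.append_of_mem heg
    subst hps
    unfold pvRound
    rw [List.foldl_append, List.foldl_cons]
    set c1 := p.foldl (fun counts e =>
        if (counts.get? (pvKeyOf e)).isSome || (memoD.get? (pvKeyOf e)).isSome then counts
        else
          let vals := e.2.2.map (fun ev => (pvVal memoD counts ev.2.1, pvVal memoD counts ev.2.2))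
          if vals.all (fun p => p.1.isSome && p.2.isSome) then
            counts.insert (pvKeyOf e) ((vals.map (fun p => p.1.getD 0 * p.2.getD 0)).sum)
          else counts) counts with hc1
    apply foldl_isSome
    by_cases hsk : ((c1.get? (pvKeyOf e)).isSome || (memoD.get? (pvKeyOf e)).isSome) = true
    · rw [if_pos hsk]
      rcases Bool.or_eq_true _ _ |>.mp hsk with h1 | h1
      · rw [← hkey]; exact h1
      · rw [h1] at hnotM; cases hnotM
    · rw [if_neg hsk]
      have hval : ∀ ch, pvOk memoD R ch = true → (pvVal memoD c1 ch).isSome = true := by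
        intro ch hok
        unfold pvVal
        cases hm : memoD.get? ch with
        | some w => simp
        | none =>
          by_cases hbch : ch = ((none, none) : PVNode)
          · rw [if_pos hbch]; simp
          · rw [if_neg hbch]
            unfold pvOk at hok
            rcases Bool.or_eq_true _ _ |>.mp hok with h1 | h1
            · rcases Bool.or_eq_true _ _ |>.mp h1 with h2 | h2
              · rw [hm] at h2; cases h2
              · exact absurd (eq_of_beq h2) hbch
            · have hmem : ch ∈ R := List.contains_iff_mem.mp h1
              have := hR ch hmem
              obtain ⟨w, hw⟩ := Option.isSome_iff_exists.mp this
              have := foldl_isSome memoD p counts ch (by rw [hw]; simp)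
              rw [← hc1] at this
              exact this
      have hall : (e.2.2.map (fun ev => (pvVal memoD c1 ev.2.1, pvVal memoD c1 ev.2.2))).all
          (fun p => p.1.isSome && p.2.isSome) = true := by
        apply List.all_eq_true.mpr
        intro pr hpr
        obtain ⟨ev, hev, hpr'⟩ := List.mem_map.mp hpr
        have := (List.all_eq_true.mp hchildren) ev hev
        obtain ⟨h1, h2⟩ := Bool.and_eq_true _ _ |>.mp this
        rw [← hpr']
        exact Bool.and_eq_true _ _ |>.mpr ⟨hval ev.2.1 h1, hval ev.2.2 h2⟩
      simp only [if_pos hall]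
      rw [PySem.Dict.get?_insert, hkey]
      simp

theorem iter_complete (memoD : PySem.Dict PVNode Int) (g : List PVEntry) :
    ∀ j n, n ∈ pvIter memoD g j → (((pvRounds memoD g j).get? n).isSome = true) := by
  intro j
  induction j with
  | zero => intro n hn; cases hn
  | succ j ihj =>
    intro n hn
    exact round_complete memoD g (pvIter memoD g j) (pvRounds memoD g j) ihj n hn

theorem iter_pvN (memoD : PySem.Dict PVNode Int) (g : List PVEntry) (hnd : (pvKeys g).Nodup) :
    ∀ j n, n ∈ pvIter memoD g j → ∃ v, pvN memoD g (j+1) n = some v := by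
  intro j
  induction j with
  | zero => intro n hn; cases hn
  | succ j ihj =>
    intro n hn
    rcases List.mem_append.mp hn with hn1 | hn1
    · obtain ⟨v, hv⟩ := ihj n hn1
      exact ⟨v, pvN_mono memoD g _ n v hv⟩
    · obtain ⟨e, hef, hkey⟩ := List.mem_map.mp hn1
      obtain ⟨heg, hflt⟩ := List.mem_filter.mp hef
      simp only [Bool.and_eq_true, Bool.not_eq_true'] at hflt
      obtain ⟨⟨hnotR, hnotM⟩, hchildren⟩ := hflt
      have hMD : memoD.get? n = none := by
        rw [← hkey]; exact Option.not_isSome_iff_eq_none.mp (by rw [hnotM]; simp)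
      by_cases hb : n = ((none, none) : PVNode)
      · exact ⟨1, pvN_base memoD g _ hMD hb⟩
      · have hch : ∀ ch, pvOk memoD (pvIter memoD g j) ch = true → ((pvN memoD g (j+1) ch).isSome = true) := by
          intro ch hok
          cases hm : memoD.get? ch with
          | some w => rw [pvN_memo memoD g j hm]; simp
          | none =>
            by_cases hbch : ch = ((none, none) : PVNode)
            · rw [pvN_base memoD g j hm hbch]; simp
            · unfold pvOk at hok
              rcases Bool.or_eq_true _ _ |>.mp hok with h1 | h1
              · rcases Bool.or_eq_true _ _ |>.mp h1 with h2 | h2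
                · rw [hm] at h2; cases h2
                · exact absurd (eq_of_beq h2) hbch
              · obtain ⟨v, hv⟩ := ihj ch (List.contains_iff_mem.mp h1)
                rw [hv]; simp
        have hall : e.2.2.all (fun ev => (pvN memoD g (j+1) ev.2.1).isSome && (pvN memoD g (j+1) ev.2.2).isSome) = true := by
          apply List.all_eq_true.mpr
          intro ev hev
          have := (List.all_eq_true.mp hchildren) ev hev
          obtain ⟨h1, h2⟩ := Bool.and_eq_true _ _ |>.mp this
          exact Bool.and_eq_true _ _ |>.mpr ⟨hch ev.2.1 h1, hch ev.2.2 h2⟩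
        have hgn : (pvGraphDict g).get? n = some e.2.2 := by
          rw [← hkey]; exact graph_get g e hnd heg
        exact ⟨_, by rw [pvN_node memoD g (j+1) hMD hb hgn, if_pos hall]⟩

-- branch-wise unfolding lemmas for count_mprs_alt
theorem alt_memo (mn : PVNode) (g : List PVEntry) (memo : List (Option String × Option String × Int))
    {v : Int} (hM : (pvMemoDict memo).get? mn = some v) : count_mprs_alt mn g memo = v := by
  unfold count_mprs_alt
  rw [hM]

theorem alt_base (mn : PVNode) (g : List PVEntry) (memo : List (Option String × Option String × Int))
    (hM : (pvMemoDict memo).get? mn = none) (hb : mn = ((none, none) : PVNode)) :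
    count_mprs_alt mn g memo = 1 := by
  unfold count_mprs_alt
  rw [hM]
  simp [hb]

theorem alt_rest (mn : PVNode) (g : List PVEntry) (memo : List (Option String × Option String × Int))
    (hM : (pvMemoDict memo).get? mn = none) (hb : ¬ mn = ((none, none) : PVNode)) :
    count_mprs_alt mn g memo = ((pvRounds (pvMemoDict memo) g g.length).get? mn).getD 0 := by
  unfold count_mprs_alt
  rw [hM]
  simp [hb]

-- ===== VERDICT (by name: the statement is the Claim_ definition above) =====
theorem count_mprs_spec : Claim_equal_count_mprs := by
  intro mn g memo _hdom hpre
  obtain ⟨hnd, -, hor⟩ := hpre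
  unfold Spec_count_mprs count_mprs
  cases hM : (pvMemoDict memo).get? mn with
  | some v => rw [alt_memo mn g memo hM]; simp [cmA, hM]
  | none =>
    by_cases hb : mn = ((none, none) : PVNode)
    · rw [alt_base mn g memo hM hb]
      subst hb
      simp [cmA, hM]
    · rw [alt_rest mn g memo hM hb]
      rcases hor with h1 | h1 | h1
      · rw [hM] at h1; simp at h1
      · exact absurd h1 hb
      · have hmem : mn ∈ pvIter (pvMemoDict memo) g g.length := List.contains_iff_mem.mp h1
        obtain ⟨v, hv⟩ := iter_pvN (pvMemoDict memo) g hnd g.length mn hmem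
        have hInvM : pvInvM (pvMemoDict memo) g (pvMemoDict memo) :=
          ⟨fun c w h => h, fun c w h => ⟨1, pvN_memo (pvMemoDict memo) g 0 h⟩⟩
        have hA := (cmA_ok (pvMemoDict memo) g (g.length + 2) (g.length + 1) (pvMemoDict memo) mn v
          (by omega) hInvM hv).1
        rw [hA]
        have hBsome := iter_complete (pvMemoDict memo) g g.length mn hmem
        obtain ⟨w, hw⟩ := Option.isSome_iff_exists.mp hBsome
        obtain ⟨k, hk⟩ := rounds_sound (pvMemoDict memo) g hnd g.length mn w hb hw
        rw [hw, Option.getD_some]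
        exact pvN_det (pvMemoDict memo) g hv hk
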